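-- pv_equiv track=rewrite | github.com/PedroDevSilva/exerciciosPythonCotuca | TecProg/PrimeiroSemestre/lista4exs/ex14.py | numeroAEsquerdaSequenciaFor
-- ===== SOURCE A (Python) =====
-- def numeroAEsquerdaSequenciaFor(sequencia, listaMaior):#versao com for range
--     for i in range(len(listaMaior)-len(sequencia)+1):
--         confirmarSequencia=[]
--         for k in range(len(sequencia)):
--             confirmarSequencia.append(listaMaior[i+k])
--         if confirmarSequencia==sequencia:
--             return listaMaior[i-1]
--     return -1
-- ===== SOURCE B (Python) =====
-- def numeroAEsquerdaSequenciaFor(sequencia, listaMaior):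
--     # Rabin-Karp: rolling hash filters candidate windows; a direct comparison
--     # confirms a match before returning the element to the left.
--     m = len(sequencia)
--     n = len(listaMaior)
--     if m > n:
--         return -1
--     base = 1000003
--     mod = (1 << 61) - 1
--     hp = 0
--     hw = 0
--     for k in range(m):
--         hp = (hp * base + sequencia[k]) % mod
--         hw = (hw * base + listaMaior[k]) % mod
--     top = pow(base, m - 1, mod) if m > 0 else 0
--     for i in range(n - m + 1):
--         if hw == hp and listaMaior[i:i + m] == sequencia:
--             return listaMaior[i - 1]
--         if i + m < n:
--             hw = ((hw - listaMaior[i] * top) * base + listaMaior[i + m]) % mod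
--     return -1
-- ===== Notes on version B (the rewrite author's own statement) =====
-- stated objective: alternative
-- what changed: Replaced the nested window-building scan with Rabin-Karp: a rolling polynomial hash filters candidate positions and only hash-equal windows are compared directly.
-- outside the precondition, e.g. on numeroAEsquerdaSequenciaFor([], []): A raises IndexError, B raises IndexError
import Mathlib
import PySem

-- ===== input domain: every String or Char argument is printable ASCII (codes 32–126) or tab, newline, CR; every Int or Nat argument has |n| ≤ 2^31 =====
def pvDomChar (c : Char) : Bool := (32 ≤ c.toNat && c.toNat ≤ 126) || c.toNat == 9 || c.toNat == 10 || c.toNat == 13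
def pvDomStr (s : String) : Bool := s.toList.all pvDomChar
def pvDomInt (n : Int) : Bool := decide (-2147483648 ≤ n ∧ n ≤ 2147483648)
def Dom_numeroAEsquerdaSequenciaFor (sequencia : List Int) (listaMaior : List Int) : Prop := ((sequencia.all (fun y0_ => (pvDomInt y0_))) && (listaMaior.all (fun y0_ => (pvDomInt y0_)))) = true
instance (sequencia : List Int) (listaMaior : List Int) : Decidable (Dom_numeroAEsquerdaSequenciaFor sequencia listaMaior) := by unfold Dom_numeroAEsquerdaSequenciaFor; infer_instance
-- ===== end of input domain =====

-- B replaces A's nested window-building scan by Rabin-Karp (rolling hash filter + direct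
-- confirmation); equivalence of return values is proved on Pre_ (A raises only on ([], [])).


-- ===== PORT A =====
-- the 'for i in range(...)' loop with early 'return': recursion over the index list;
-- all element accesses are in range whenever reached (pyGetD's default is never used inside Pre_)
def pvALoop (sequencia listaMaior : List Int) : List Int → Int
  | [] => -1
  | i :: rest =>
    let confirmarSequencia := (PySem.List.pyRange 0 (sequencia.length : Int)).foldl
      (fun acc k => acc ++ [PySem.List.pyGetD listaMaior (i + k) 0]) []
    if confirmarSequencia = sequencia then PySem.List.pyGetD listaMaior (i - 1) 0
    else pvALoop sequencia listaMaior rest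

def numeroAEsquerdaSequenciaFor (sequencia : List Int) (listaMaior : List Int) : Int :=
  pvALoop sequencia listaMaior
    (PySem.List.pyRange 0 ((listaMaior.length : Int) - (sequencia.length : Int) + 1))

-- ===== PORT B =====
-- Rabin-Karp main loop: hash filter, direct confirmation, rolling update
def pvBLoop (sequencia listaMaior : List Int) (m n base md hp top : Int) :
    List Int → Int → Int
  | [], _ => -1
  | i :: rest, hw =>
    if hw = hp ∧ PySem.List.slice listaMaior (some i) (some (i + m)) = sequencia then
      PySem.List.pyGetD listaMaior (i - 1) 0
    else
      pvBLoop sequencia listaMaior m n base md hp top rest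
        (if i + m < n then
          PySem.Int.mod ((hw - PySem.List.pyGetD listaMaior i 0 * top) * base
            + PySem.List.pyGetD listaMaior (i + m) 0) md
        else hw)

def numeroAEsquerdaSequenciaFor_alt (sequencia : List Int) (listaMaior : List Int) : Int :=
  let m : Int := sequencia.length
  let n : Int := listaMaior.length
  if m > n then -1
  else
    let base : Int := 1000003
    let md : Int := 2305843009213693951
    -- one 'for k in range(m)' loop with the two hash accumulators as a pair
    let hs := (PySem.List.pyRange 0 m).foldl
      (fun s k => (PySem.Int.mod (s.1 * base + PySem.List.pyGetD sequencia k 0) md,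
                   PySem.Int.mod (s.2 * base + PySem.List.pyGetD listaMaior k 0) md)) (0, 0)
    -- pow(base, m-1, md); exponent m-1 ≥ 0 in this branch, so .toNat is exact
    let top : Int := if m > 0 then PySem.Int.powMod base (m - 1).toNat md else 0
    pvBLoop sequencia listaMaior m n base md hs.1 top
      (PySem.List.pyRange 0 (n - m + 1)) hs.2

-- ===== PRECONDITION & SPEC =====
-- Pre_ excludes only ([], []), where A evaluates listaMaior[-1] on the empty list and raises IndexError.
def Pre_numeroAEsquerdaSequenciaFor (sequencia : List Int) (listaMaior : List Int) : Prop :=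
  sequencia ≠ [] ∨ listaMaior ≠ []
instance (sequencia : List Int) (listaMaior : List Int) : Decidable (Pre_numeroAEsquerdaSequenciaFor sequencia listaMaior) := by unfold Pre_numeroAEsquerdaSequenciaFor; infer_instance
def pvWitness_numeroAEsquerdaSequenciaFor : List Int × List Int := ([1, 3], [2, 1, 3, 4])
def Spec_numeroAEsquerdaSequenciaFor (sequencia : List Int) (listaMaior : List Int) (out : Int) : Prop := out = numeroAEsquerdaSequenciaFor_alt sequencia listaMaior
instance (sequencia : List Int) (listaMaior : List Int) (out : Int) : Decidable (Spec_numeroAEsquerdaSequenciaFor sequencia listaMaior out) := by unfold Spec_numeroAEsquerdaSequenciaFor; infer_instance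

-- ===== CLAIM (what is proved, stated in full; the proofs are below) =====
def Claim_equal_numeroAEsquerdaSequenciaFor : Prop := ∀ (sequencia : List Int) (listaMaior : List Int), Dom_numeroAEsquerdaSequenciaFor sequencia listaMaior → Pre_numeroAEsquerdaSequenciaFor sequencia listaMaior → Spec_numeroAEsquerdaSequenciaFor sequencia listaMaior (numeroAEsquerdaSequenciaFor sequencia listaMaior)

-- ===== LEMMAS AND PROOFS =====

-- the hash parameters of Source B, and the pure polynomial value the rolling hash tracks mod pvP
def pvB : Int := 1000003
def pvP : Int := 2305843009213693951
def pvPolyFrom (h : Int) (xs : List Int) : Int := xs.foldl (fun h x => h * pvB + x) h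
def pvHash (xs : List Int) : Int := xs.foldl (fun h x => PySem.Int.mod (h * pvB + x) pvP) 0
def pvWin (lm : List Int) (a mn : Nat) : List Int := (lm.drop a).take mn

lemma pvP_pos : (0:Int) < pvP := by norm_num [pvP]

lemma pvMapId (xs : List Int) (mn : Nat) (h : mn ≤ xs.length) :
    (PySem.List.pyRange 0 (mn : Int)).map (fun k => PySem.List.pyGetD xs k 0) = xs.take mn := by
  rw [PySem.List.pyRange_zero_natCast, List.map_map]
  apply List.ext_getElem
  · simp [h]
  · intro i h1 h2
    simp at h1 ⊢
    rw [List.getElem?_eq_getElem (by omega)]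
    rfl

lemma pvMapWin (lm : List Int) (a mn : Nat) (h : a + mn ≤ lm.length) :
    (PySem.List.pyRange 0 (mn : Int)).map (fun k => PySem.List.pyGetD lm ((a : Int) + k) 0)
      = pvWin lm a mn := by
  rw [PySem.List.pyRange_zero_natCast, List.map_map]
  apply List.ext_getElem
  · simp [pvWin]; omega
  · intro i h1 h2
    simp [pvWin] at h1 ⊢
    rw [show ((a:Int) + (i:Int)) = ((a + i : Nat) : Int) by push_cast; ring,
      PySem.List.pyGetD_natCast, List.getD_eq_getElem _ _ (by omega)]

lemma pvFoldRange (xs : List Int) (mn : Nat) (h : mn ≤ xs.length)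
    (f : Int → Int → Int) (z : Int) :
    (PySem.List.pyRange 0 (mn : Int)).foldl (fun s k => f s (PySem.List.pyGetD xs k 0)) z
      = (xs.take mn).foldl f z := by
  rw [← pvMapId xs mn h, List.foldl_map]

lemma pvPolyFrom_modeq (xs : List Int) : ∀ (h h' : Int), h ≡ h' [ZMOD pvP] →
    pvPolyFrom h xs ≡ pvPolyFrom h' xs [ZMOD pvP] := by
  induction xs with
  | nil => intro h h' hh; simpa [pvPolyFrom] using hh
  | cons x t ih =>
    intro h h' hh
    simpa [pvPolyFrom] using ih _ _ ((hh.mul_right pvB).add_right x)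

lemma pvHash_eq (xs : List Int) : ∀ (h : Int), h % pvP = h →
    xs.foldl (fun h x => PySem.Int.mod (h * pvB + x) pvP) h = (pvPolyFrom h xs) % pvP := by
  induction xs with
  | nil => intro h hh; simpa [pvPolyFrom] using hh.symm
  | cons x t ih =>
    intro h hh
    have hstep : pvPolyFrom h (x :: t) = pvPolyFrom (h * pvB + x) t := by simp [pvPolyFrom]
    rw [List.foldl_cons, PySem.Int.mod_eq_emod_of_pos pvP_pos,
      ih _ (Int.emod_emod _ _), hstep]
    exact pvPolyFrom_modeq t _ _ (Int.emod_emod _ _)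

lemma pvPolyFrom_split (xs : List Int) : ∀ (h : Int),
    pvPolyFrom h xs = h * pvB ^ xs.length + pvPolyFrom 0 xs := by
  induction xs with
  | nil => intro h; simp [pvPolyFrom]
  | cons x t ih =>
    intro h
    simp only [pvPolyFrom, List.foldl_cons] at *
    rw [ih (h * pvB + x), ih (0 * pvB + x)]
    simp [List.length_cons]; ring

lemma pvPolyFrom_append (xs : List Int) (h y : Int) :
    pvPolyFrom h (xs ++ [y]) = pvPolyFrom h xs * pvB + y := by
  simp [pvPolyFrom]

lemma pvHash_def (xs : List Int) : pvHash xs = pvPolyFrom 0 xs % pvP := by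
  simpa [pvHash] using pvHash_eq xs 0 (by simp)

lemma pvWin_cons (lm : List Int) (a mn : Nat) (hmn : 0 < mn) (h : a + mn ≤ lm.length) :
    pvWin lm a mn = lm.getD a 0 :: (lm.drop (a + 1)).take (mn - 1) := by
  have ha : a < lm.length := by omega
  obtain ⟨k, rfl⟩ : ∃ k, mn = k + 1 := ⟨mn - 1, by omega⟩
  rw [pvWin, List.drop_eq_getElem_cons ha, List.take_succ_cons, List.getD_eq_getElem _ _ ha]
  rfl

lemma pvWin_snoc (lm : List Int) (a mn : Nat) (hmn : 0 < mn) (h : a + mn < lm.length) :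
    pvWin lm (a + 1) mn = (lm.drop (a + 1)).take (mn - 1) ++ [lm.getD (a + mn) 0] := by
  obtain ⟨k, rfl⟩ : ∃ k, mn = k + 1 := ⟨mn - 1, by omega⟩
  have e : a + 1 + k = a + (k + 1) := by omega
  rw [pvWin, List.take_add_one, List.getElem?_drop, e,
    List.getElem?_eq_getElem (by omega : a + (k + 1) < lm.length),
    List.getD_eq_getElem _ _ (by omega : a + (k + 1) < lm.length)]
  simp

lemma pvRoll (lm : List Int) (a mn : Nat) (hmn : 0 < mn) (h : a + mn < lm.length) :
    PySem.Int.mod ((pvHash (pvWin lm a mn)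
        - PySem.List.pyGetD lm (a : Int) 0 * PySem.Int.powMod pvB (mn - 1) pvP) * pvB
        + PySem.List.pyGetD lm ((a : Int) + (mn : Int)) 0) pvP
      = pvHash (pvWin lm (a + 1) mn) := by
  have hle : a + mn ≤ lm.length := le_of_lt h
  have hlen : ((lm.drop (a + 1)).take (mn - 1)).length = mn - 1 := by simp; omega
  rw [PySem.Int.mod_eq_emod_of_pos pvP_pos, PySem.Int.powMod_eq_emod _ _ pvP_pos,
    PySem.List.pyGetD_natCast,
    show ((a : Int) + (mn : Int)) = ((a + mn : Nat) : Int) by push_cast; ring,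
    PySem.List.pyGetD_natCast, pvHash_def, pvHash_def,
    pvWin_cons lm a mn hmn hle, pvWin_snoc lm a mn hmn h]
  have hc : pvPolyFrom 0 (lm.getD a 0 :: (lm.drop (a + 1)).take (mn - 1))
      = lm.getD a 0 * pvB ^ (mn - 1) + pvPolyFrom 0 ((lm.drop (a + 1)).take (mn - 1)) := by
    have h0 : pvPolyFrom 0 (lm.getD a 0 :: (lm.drop (a + 1)).take (mn - 1))
        = pvPolyFrom (lm.getD a 0) ((lm.drop (a + 1)).take (mn - 1)) := by simp [pvPolyFrom]
    rw [h0, pvPolyFrom_split _ (lm.getD a 0), hlen]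
  rw [hc, pvPolyFrom_append]
  have m1 : ((lm.getD a 0 * pvB ^ (mn - 1) + pvPolyFrom 0 ((lm.drop (a + 1)).take (mn - 1))) % pvP)
      ≡ (lm.getD a 0 * pvB ^ (mn - 1) + pvPolyFrom 0 ((lm.drop (a + 1)).take (mn - 1))) [ZMOD pvP] :=
    Int.emod_emod _ _
  have m2 : (pvB ^ (mn - 1) % pvP) ≡ pvB ^ (mn - 1) [ZMOD pvP] := Int.emod_emod _ _
  have hm := ((m1.sub (m2.mul_left (lm.getD a 0))).mul_right pvB).add_right (lm.getD (a + mn) 0)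
  rw [show (lm.getD a 0 * pvB ^ (mn - 1) + pvPolyFrom 0 ((lm.drop (a + 1)).take (mn - 1))
      - lm.getD a 0 * pvB ^ (mn - 1)) = pvPolyFrom 0 ((lm.drop (a + 1)).take (mn - 1)) from by ring] at hm
  exact hm

lemma pvLoopEq (seq lm : List Int) (mn : Nat) (hm : seq.length = mn) (hmn : mn ≤ lm.length) :
    ∀ (cnt a : Nat) (hw : Int), a + cnt = lm.length - mn + 1 →
      (a + mn ≤ lm.length → hw = pvHash (pvWin lm a mn)) →
      pvALoop seq lm (PySem.List.pyRange (a : Int) ((lm.length : Int) - (seq.length : Int) + 1))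
        = pvBLoop seq lm (seq.length : Int) (lm.length : Int) pvB pvP (pvHash seq)
            (if (seq.length : Int) > 0 then PySem.Int.powMod pvB ((seq.length : Int) - 1).toNat pvP else 0)
            (PySem.List.pyRange (a : Int) ((lm.length : Int) - (seq.length : Int) + 1)) hw := by
  intro cnt
  induction cnt with
  | zero =>
    intro a hw hcnt _
    rw [PySem.List.pyRange_one_eq_nil (by rw [hm]; omega)]
    simp [pvALoop, pvBLoop]
  | succ c ih =>
    intro a hw hcnt hinv
    have hlt : (a : Int) < (lm.length : Int) - (seq.length : Int) + 1 := by
      rw [hm]; omega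
    have hale : a + mn ≤ lm.length := by omega
    have hwv := hinv hale
    rw [PySem.List.pyRange_one_cons hlt]
    simp only [pvALoop, pvBLoop]
    have hconf : (PySem.List.pyRange 0 (seq.length : Int)).foldl
        (fun acc k => acc ++ [PySem.List.pyGetD lm ((a : Int) + k) 0]) [] = pvWin lm a mn := by
      rw [PySem.List.foldl_append_singleton_eq_map, hm, pvMapWin lm a mn hale]
      simp
    have hslice : PySem.List.slice lm (some (a : Int)) (some ((a : Int) + (seq.length : Int)))
        = pvWin lm a mn := by
      rw [hm]
      exact PySem.List.slice_natCast_add lm a mn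
    by_cases hc : pvWin lm a mn = seq
    · rw [hconf]
      rw [hc] at hwv
      simp [hslice, hc, hwv]
    · rw [hconf, if_neg hc, if_neg (fun hb => hc (hslice ▸ hb.2))]
      rw [show ((a : Int) + 1) = ((a + 1 : Nat) : Int) by push_cast; ring]
      apply ih (a + 1) _ (by omega)
      intro h2
      have hmn0 : 0 < mn := by
        rcases Nat.eq_zero_or_pos mn with h0 | h0
        · exfalso
          apply hc
          subst h0
          rw [List.eq_nil_of_length_eq_zero hm]
          simp [pvWin]
        · exact h0
      have hlt2 : (a : Int) + (seq.length : Int) < (lm.length : Int) := by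
        rw [hm]; omega
      rw [if_pos hlt2, hwv, hm, if_pos (by omega : ((mn : Nat) : Int) > 0),
        show (((mn : Nat) : Int) - 1).toNat = mn - 1 from by omega]
      exact pvRoll lm a mn hmn0 (by omega)

-- ===== VERDICT (by name: the statement is the Claim_ definition above) =====
theorem numeroAEsquerdaSequenciaFor_spec : Claim_equal_numeroAEsquerdaSequenciaFor := by
  intro seq lm _ _
  unfold Spec_numeroAEsquerdaSequenciaFor
  simp only [numeroAEsquerdaSequenciaFor, numeroAEsquerdaSequenciaFor_alt]
  by_cases hgt : (seq.length : Int) > (lm.length : Int)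
  · rw [if_pos hgt, PySem.List.pyRange_one_eq_nil (by omega)]
    rfl
  · rw [if_neg hgt]
    have hmn : seq.length ≤ lm.length := by exact_mod_cast not_lt.mp hgt
    have h1 : (PySem.List.pyRange 0 (seq.length : Int)).foldl
        (fun s k => PySem.Int.mod (s * 1000003 + PySem.List.pyGetD seq k 0) 2305843009213693951) 0
        = pvHash seq := by
      simpa [pvHash, pvB, pvP] using pvFoldRange seq seq.length le_rfl
        (fun s x => PySem.Int.mod (s * 1000003 + x) 2305843009213693951) 0
    have h2 : (PySem.List.pyRange 0 (seq.length : Int)).foldl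
        (fun s k => PySem.Int.mod (s * 1000003 + PySem.List.pyGetD lm k 0) 2305843009213693951) 0
        = pvHash (pvWin lm 0 seq.length) := by
      simpa [pvHash, pvWin, pvB, pvP] using pvFoldRange lm seq.length hmn
        (fun s x => PySem.Int.mod (s * 1000003 + x) 2305843009213693951) 0
    have hsplit : (PySem.List.pyRange 0 (seq.length : Int)).foldl
        (fun s k => (PySem.Int.mod (s.1 * 1000003 + PySem.List.pyGetD seq k 0) 2305843009213693951,
                     PySem.Int.mod (s.2 * 1000003 + PySem.List.pyGetD lm k 0) 2305843009213693951))
        ((0 : Int), (0 : Int))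
        = (pvHash seq, pvHash (pvWin lm 0 seq.length)) := by
      rw [PySem.List.foldl_prod_mk
        (f := fun s k => PySem.Int.mod (s * 1000003 + PySem.List.pyGetD seq k 0) 2305843009213693951)
        (g := fun s k => PySem.Int.mod (s * 1000003 + PySem.List.pyGetD lm k 0) 2305843009213693951),
        h1, h2]
    rw [hsplit, show (1000003 : Int) = pvB from rfl, show (2305843009213693951 : Int) = pvP from rfl]
    have key := pvLoopEq seq lm seq.length rfl hmn (lm.length - seq.length + 1) 0
      (pvHash (pvWin lm 0 seq.length)) (by omega) (fun _ => rfl)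
    simp only [Nat.cast_zero] at key
    exact key
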